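-- pv_equiv track=rewrite | github.com/EmboMaster/EmboMatrix | src/bddl_gen/read_files.py | clean_bddl_content
-- ===== SOURCE A (Python) =====
-- def clean_bddl_content(content):
--     """清理 BDDL 文件内容，去除在 :init 之后出现的带关键词的行。"""
--
--     in_init = False
--     cleaned_lines = []
--     skip_keywords = {"dusty", "stained", "soaked", "sliced"}
--
--     for line in content.splitlines():
--         stripped = line.strip()
--
--         # 进入 :init 后开始处理
--         if not in_init and stripped.startswith("(:init"):
--             in_init = True
--             cleaned_lines.append(line)
--             continue
--
--         if in_init:
--             # 只跳过含有关键字的行，其余保留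
--             if any(keyword in stripped for keyword in skip_keywords):
--                 continue
--
--         cleaned_lines.append(line)
--
--     return "\n".join(cleaned_lines)
-- ===== SOURCE B (Python) =====
-- def clean_bddl_content(content):
--     """Boundary-finding pass + separate filter pass instead of a stateful single loop."""
--     lines = content.splitlines()
--     skip_keywords = ("dusty", "stained", "soaked", "sliced")
--     idx = None
--     for i, line in enumerate(lines):
--         if line.strip().startswith("(:init"):
--             idx = i
--             break
--     if idx is None:
--         return "\n".join(lines)
--     prefix = lines[:idx + 1]
--     suffix = [l for l in lines[idx + 1:]
--               if not any(k in l.strip() for k in skip_keywords)]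
--     return "\n".join(prefix + suffix)
-- ===== Notes on version B (the rewrite author's own statement) =====
-- stated objective: alternative
-- what changed: Replaces the stateful single pass (an in_init flag threaded through one loop) by a boundary-finding scan for the first '(:init' line followed by a separate keyword filter of the suffix, joining prefix + filtered suffix.
import Mathlib
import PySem

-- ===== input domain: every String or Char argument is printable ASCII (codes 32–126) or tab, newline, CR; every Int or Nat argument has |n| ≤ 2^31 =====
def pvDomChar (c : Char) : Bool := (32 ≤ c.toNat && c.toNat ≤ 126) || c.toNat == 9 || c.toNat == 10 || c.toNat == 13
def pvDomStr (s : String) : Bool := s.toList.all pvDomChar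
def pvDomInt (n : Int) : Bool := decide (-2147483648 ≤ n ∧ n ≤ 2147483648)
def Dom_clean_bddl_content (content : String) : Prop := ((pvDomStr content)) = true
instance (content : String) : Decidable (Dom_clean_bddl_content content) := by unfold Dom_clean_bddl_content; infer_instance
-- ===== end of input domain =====

-- B replaces A's stateful single pass by a boundary-finding scan plus a separate filter of the suffix (alternative decomposition, same cost).


-- ===== PORT A =====
def pvSkipKeywords : List String := ["dusty", "stained", "soaked", "sliced"]

-- A's loop: one pass threading the in_init flag; appends become cons-recursion over the same lines.
def pvCleanLoop : List String → Bool → List String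
  | [], _ => []
  | line :: rest, in_init =>
    let stripped := PySem.Str.strip line
    if !in_init && PySem.Str.startswith stripped "(:init" then
      line :: pvCleanLoop rest true
    else if in_init && pvSkipKeywords.any (fun k => PySem.Str.isIn k stripped) then
      pvCleanLoop rest in_init
    else
      line :: pvCleanLoop rest in_init

def clean_bddl_content (content : String) : String :=
  PySem.Str.join "\n" (pvCleanLoop (PySem.Str.splitlines content) false)

-- ===== PORT B =====
def pvIsInit (line : String) : Bool :=
  PySem.Str.startswith (PySem.Str.strip line) "(:init"

def pvHasKeyword (line : String) : Bool :=
  pvSkipKeywords.any (fun k => PySem.Str.isIn k (PySem.Str.strip line))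

def clean_bddl_content_alt (content : String) : String :=
  let lines := PySem.Str.splitlines content
  match lines.findIdx? pvIsInit with
  | none => PySem.Str.join "\n" lines
  | some idx =>
      PySem.Str.join "\n"
        (lines.take (idx + 1) ++ (lines.drop (idx + 1)).filter (fun l => !pvHasKeyword l))

-- ===== PRECONDITION & SPEC =====
def Spec_clean_bddl_content (content : String) (out : String) : Prop := out = clean_bddl_content_alt content
instance (content : String) (out : String) : Decidable (Spec_clean_bddl_content content out) := by unfold Spec_clean_bddl_content; infer_instance

-- ===== CLAIM (what is proved, stated in full; the proofs are below) =====
def Claim_equal_clean_bddl_content : Prop := ∀ (content : String), Dom_clean_bddl_content content → Spec_clean_bddl_content content (clean_bddl_content content)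

-- ===== LEMMAS AND PROOFS =====

-- After the flag is set, A's loop is exactly the keyword filter.
set_option maxHeartbeats 1000000 in
theorem pvCleanLoop_true (lines : List String) :
    pvCleanLoop lines true = lines.filter (fun l => !pvHasKeyword l) := by
  induction lines with
  | nil => rfl
  | cons l rest ih =>
    have step : pvCleanLoop (l :: rest) true =
        if pvHasKeyword l then pvCleanLoop rest true else l :: pvCleanLoop rest true := rfl
    by_cases h : pvHasKeyword l = true
    · rw [step, if_pos h, ih]
      simp [List.filter_cons, h]
    · rw [step, if_neg h, ih]
      simp [List.filter_cons, h]

-- Before the flag is set, A's loop splits at the first init line.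
theorem pvCleanLoop_false (lines : List String) :
    pvCleanLoop lines false =
      match lines.findIdx? pvIsInit with
      | none => lines
      | some idx => lines.take (idx + 1) ++ (lines.drop (idx + 1)).filter (fun l => !pvHasKeyword l) := by
  induction lines with
  | nil => rfl
  | cons l rest ih =>
    have step : pvCleanLoop (l :: rest) false =
        if pvIsInit l then l :: pvCleanLoop rest true else l :: pvCleanLoop rest false := rfl
    rw [step, List.findIdx?_cons]
    by_cases h : pvIsInit l = true
    · rw [if_pos h, if_pos h, pvCleanLoop_true]
      simp
    · rw [if_neg (by simp [h]), if_neg (by simp [h]), ih]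
      cases hf : rest.findIdx? pvIsInit with
      | none => simp [hf]
      | some idx => simp [hf, List.take_succ_cons, List.drop_succ_cons]

-- ===== VERDICT (by name: the statement is the Claim_ definition above) =====
theorem clean_bddl_content_spec : Claim_equal_clean_bddl_content := by
  intro content _
  unfold Spec_clean_bddl_content clean_bddl_content clean_bddl_content_alt
  rw [pvCleanLoop_false]
  cases hf : (PySem.Str.splitlines content).findIdx? pvIsInit <;> simp [hf]
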